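-- pv_equiv track=rewrite | github.com/talmosko-code/nanoclaw | container/podcast-scripts/get-captions.py | parse_sbv
-- ===== SOURCE A (Python) =====
-- def parse_sbv(content):
--     """Parse SBV format to plain text lines."""
--     lines = []
--     for block in content.strip().split("\n\n"):
--         parts = block.split("\n", 1)
--         if len(parts) > 1:
--             text = parts[1].strip()
--             # Remove duplicate lines
--             if text and (not lines or text != lines[-1]):
--                 lines.append(text)
--     return "\n".join(lines)
-- ===== SOURCE B (Python) =====
-- def parse_sbv(content):
--     """Parse SBV format to plain text lines (run-skipping scan: collect cleaned
--     non-empty segments first, then emit one line per run of equal consecutive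
--     segments, groupby-style)."""
--     segs = []
--     for block in content.strip().split("\n\n"):
--         parts = block.split("\n", 1)
--         if len(parts) > 1:
--             text = parts[1].strip()
--             if text:
--                 segs.append(text)
--     out = []
--     i = 0
--     n = len(segs)
--     while i < n:
--         out.append(segs[i])
--         j = i + 1
--         while j < n and segs[j] == segs[i]:
--             j += 1
--         i = j
--     return "\n".join(out)
-- ===== Notes on version B (the rewrite author's own statement) =====
-- stated objective: alternative
-- what changed: Dedup is restructured from A's conditional append comparing each text to the running lines[-1] sentinel into a two-phase groupby-style algorithm: first build all cleaned non-empty segments unconditionally, then a run-skipping scan (outer loop per run, inner loop advancing past equal consecutive segments) emits one representative per run.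
import Mathlib
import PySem

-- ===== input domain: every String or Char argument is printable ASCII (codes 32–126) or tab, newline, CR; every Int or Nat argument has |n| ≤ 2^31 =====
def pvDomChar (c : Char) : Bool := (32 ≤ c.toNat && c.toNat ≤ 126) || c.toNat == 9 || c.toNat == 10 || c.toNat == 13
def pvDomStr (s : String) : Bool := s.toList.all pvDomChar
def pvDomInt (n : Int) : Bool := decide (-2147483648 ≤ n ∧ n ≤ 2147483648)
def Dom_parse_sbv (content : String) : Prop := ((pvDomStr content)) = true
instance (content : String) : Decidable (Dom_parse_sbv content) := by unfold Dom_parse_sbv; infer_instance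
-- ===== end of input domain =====

-- B restructures A's running lines[-1] sentinel dedup into a two-phase groupby-style
-- algorithm: collect all cleaned non-empty segments, then a run-skipping scan emits one
-- line per run of equal consecutive segments; objective: alternative, same cost.


-- ===== PORT A =====
def parse_sbv (content : String) : String :=
  let lines : List String :=
    (((PySem.Str.split? (PySem.Str.strip content) "\n\n").getD []).foldl
      (fun lines block =>
        match PySem.Str.splitMax? block "\n" 1 with
        | some parts =>
          if 1 < parts.length then
            let text := PySem.Str.strip (PySem.List.pyGetD parts 1 "")
            -- Remove duplicate lines
            if text ≠ "" ∧ (lines = [] ∨ text ≠ PySem.List.pyGetD lines (-1) "") then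
              lines ++ [text]
            else lines
          else lines
        | none => lines)   -- unreachable: the separator "\n" is non-empty
      [])
  PySem.Str.join "\n" lines

-- ===== PORT B =====
-- the inner/outer while loops of Source B: emit the run's head, skip past its equal copies
def pvRuns (segs : List String) : List String :=
  match segs with
  | [] => []
  | x :: xs => x :: pvRuns (xs.dropWhile (fun y => y == x))
termination_by segs.length
decreasing_by
  exact Nat.lt_succ_of_le (List.length_dropWhile_le _ _)

def parse_sbv_alt (content : String) : String :=
  let segs : List String :=
    (((PySem.Str.split? (PySem.Str.strip content) "\n\n").getD []).foldl
      (fun segs block =>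
        match PySem.Str.splitMax? block "\n" 1 with
        | some parts =>
          if 1 < parts.length then
            let text := PySem.Str.strip (PySem.List.pyGetD parts 1 "")
            if text ≠ "" then segs ++ [text] else segs
          else segs
        | none => segs)   -- unreachable: the separator "\n" is non-empty
      [])
  PySem.Str.join "\n" (pvRuns segs)

-- ===== PRECONDITION & SPEC =====
def Spec_parse_sbv (content : String) (out : String) : Prop := out = parse_sbv_alt content
instance (content : String) (out : String) : Decidable (Spec_parse_sbv content out) := by unfold Spec_parse_sbv; infer_instance

-- ===== CLAIM (what is proved, stated in full; the proofs are below) =====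
def Claim_equal_parse_sbv : Prop := ∀ (content : String), Dom_parse_sbv content → Spec_parse_sbv content (parse_sbv content)

-- ===== LEMMAS AND PROOFS =====

-- A's per-segment dedup step, once the empty-text guard has fired
def pvStepA (lines : List String) (t : String) : List String :=
  if lines = [] ∨ t ≠ PySem.List.pyGetD lines (-1) "" then lines ++ [t] else lines

-- the segment a block contributes (none if no second line or blank text)
def pvSeg (b : String) : Option String :=
  match PySem.Str.splitMax? b "\n" 1 with
  | some p =>
    if 1 < p.length then
      let t := PySem.Str.strip (PySem.List.pyGetD p 1 "")
      if t ≠ "" then some t else none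
    else none
  | none => none

-- run collapse threaded with the previous emitted line
def pvRunsAux (p : String) (segs : List String) : List String :=
  match segs with
  | [] => []
  | x :: xs => if x = p then pvRunsAux p xs else x :: pvRunsAux x xs

-- A's block loop is the dedup step folded over the blocks' segments
theorem pv_foldA_eq (blocks : List String) (acc : List String) :
    blocks.foldl
      (fun lines block =>
        match PySem.Str.splitMax? block "\n" 1 with
        | some parts =>
          if 1 < parts.length then
            let text := PySem.Str.strip (PySem.List.pyGetD parts 1 "")
            if text ≠ "" ∧ (lines = [] ∨ text ≠ PySem.List.pyGetD lines (-1) "") then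
              lines ++ [text]
            else lines
          else lines
        | none => lines) acc
    = (blocks.filterMap pvSeg).foldl pvStepA acc := by
  induction blocks generalizing acc with
  | nil => rfl
  | cons b bs ih =>
    simp only [List.foldl_cons, List.filterMap_cons]
    have hstep : (match PySem.Str.splitMax? b "\n" 1 with
        | some parts =>
          if 1 < parts.length then
            let text := PySem.Str.strip (PySem.List.pyGetD parts 1 "")
            if text ≠ "" ∧ (acc = [] ∨ text ≠ PySem.List.pyGetD acc (-1) "") then
              acc ++ [text]
            else acc
          else acc
        | none => acc)
        = (match pvSeg b with | some t => pvStepA acc t | none => acc) := by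
      unfold pvSeg pvStepA
      cases PySem.Str.splitMax? b "\n" 1 with
      | none => rfl
      | some p =>
        simp only
        split_ifs with h1 h2 h3 h4 <;> simp_all
    rw [hstep]
    cases h : pvSeg b with
    | none => simp [ih]
    | some t => simp [ih]

-- B's segment loop collects exactly those segments
theorem pv_foldB_eq (blocks : List String) (acc : List String) :
    blocks.foldl
      (fun segs block =>
        match PySem.Str.splitMax? block "\n" 1 with
        | some parts =>
          if 1 < parts.length then
            let text := PySem.Str.strip (PySem.List.pyGetD parts 1 "")
            if text ≠ "" then segs ++ [text] else segs
          else segs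
        | none => segs) acc
    = acc ++ blocks.filterMap pvSeg := by
  induction blocks generalizing acc with
  | nil => simp
  | cons b bs ih =>
    simp only [List.foldl_cons, List.filterMap_cons]
    have hstep : (match PySem.Str.splitMax? b "\n" 1 with
        | some parts =>
          if 1 < parts.length then
            let text := PySem.Str.strip (PySem.List.pyGetD parts 1 "")
            if text ≠ "" then acc ++ [text] else acc
          else acc
        | none => acc)
        = (match pvSeg b with | some t => acc ++ [t] | none => acc) := by
      unfold pvSeg
      cases PySem.Str.splitMax? b "\n" 1 with
      | none => rfl
      | some p =>
        simp only
        split_ifs <;> simp_all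
    rw [hstep]
    cases h : pvSeg b with
    | none => exact ih acc
    | some t => rw [ih]; simp

theorem pvRuns_nil : pvRuns [] = [] := by rw [pvRuns.eq_def]

theorem pvRuns_cons (x : String) (xs : List String) :
    pvRuns (x :: xs) = x :: pvRuns (xs.dropWhile (fun y => y == x)) := by
  rw [pvRuns.eq_def]

-- the run-skipping recursion equals the threaded collapse
theorem pvRunsAux_eq_runs (x : String) (xs : List String) :
    pvRunsAux x xs = pvRuns (xs.dropWhile (fun y => y == x)) := by
  induction xs generalizing x with
  | nil => simp [pvRunsAux, pvRuns_nil]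
  | cons y ys ih =>
    by_cases h : y = x
    · simp [pvRunsAux, h, ih]
    · simp only [pvRunsAux, List.dropWhile_cons, beq_iff_eq, h, if_false]
      rw [pvRuns_cons, ih y]

-- the key invariant: A's sentinel fold equals the threaded run collapse
theorem pv_fold_eq_runsAux (segs : List String) (hne : ∀ t ∈ segs, t ≠ "")
    (acc : List String) (p : String)
    (hp : (if acc = [] then "" else PySem.List.pyGetD acc (-1) "") = p) :
    segs.foldl pvStepA acc = acc ++ pvRunsAux p segs := by
  induction segs generalizing acc p with
  | nil => simp [pvRunsAux]
  | cons x xs ih =>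
    have hx : x ≠ "" := hne x (by simp)
    have hne' : ∀ t ∈ xs, t ≠ "" := fun t ht => hne t (by simp [ht])
    rw [List.foldl_cons]
    by_cases hxp : x = p
    · have haccne : acc ≠ [] := by
        intro h
        rw [h, if_pos rfl] at hp
        exact hx (hxp.trans hp.symm)
      have hlast : PySem.List.pyGetD acc (-1) "" = p := by
        rw [if_neg haccne] at hp; exact hp
      have hstep : pvStepA acc x = acc := by
        unfold pvStepA
        rw [if_neg]
        simp only [not_or, not_not, ne_eq]
        exact ⟨haccne, by rw [hlast, hxp]⟩
      rw [hstep, ih hne' acc p (by rw [if_neg haccne, hlast])]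
      simp [pvRunsAux, hxp]
    · have hstep : pvStepA acc x = acc ++ [x] := by
        unfold pvStepA
        by_cases hacc : acc = []
        · simp [hacc]
        · rw [if_neg hacc] at hp
          simp [hp, hxp]
      rw [hstep,
        ih hne' (acc ++ [x]) x
          (by rw [if_neg (by simp), PySem.List.pyGetD_neg_one_append_singleton])]
      simp [pvRunsAux, hxp]

-- every segment pvSeg yields is non-blank
theorem pv_seg_ne_empty (blocks : List String) :
    ∀ t ∈ blocks.filterMap pvSeg, t ≠ "" := by
  intro t ht
  obtain ⟨b, _, hb⟩ := List.mem_filterMap.mp ht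
  unfold pvSeg at hb
  rcases h' : PySem.Str.splitMax? b "\n" 1 with _ | p <;> simp only [h'] at hb
  · exact absurd hb (by simp)
  · split_ifs at hb with h1 h2
    injection hb with hb
    exact hb ▸ h2

-- starting with the "" sentinel and a blank-free list, the collapse is pvRuns
theorem pvRunsAux_empty (segs : List String) (hne : ∀ t ∈ segs, t ≠ "") :
    pvRunsAux "" segs = pvRuns segs := by
  cases segs with
  | nil => simp [pvRunsAux, pvRuns]
  | cons x xs =>
    have hx : x ≠ "" := hne x (by simp)
    rw [pvRunsAux, if_neg hx, pvRunsAux_eq_runs, pvRuns_cons]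

-- ===== VERDICT (by name: the statement is the Claim_ definition above) =====
theorem parse_sbv_spec : Claim_equal_parse_sbv := by
  intro content _
  unfold Spec_parse_sbv parse_sbv parse_sbv_alt
  dsimp only
  rw [pv_foldA_eq, pv_foldB_eq, List.nil_append,
    pv_fold_eq_runsAux _ (pv_seg_ne_empty _) [] "" rfl, List.nil_append,
    pvRunsAux_empty _ (pv_seg_ne_empty _)]
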